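-- pv_equiv track=rewrite | github.com/sammargh/gfdmtools | ps2/ps2_pak_dumper.py | calculate_filename_hash_crc16_cs
-- ===== SOURCE A (Python) =====
-- def calculate_filename_hash_crc16_cs(data):
--     crc16_ccitt_table = [
--         0x0000, 0x1021, 0x2042, 0x3063, 0x4084, 0x50a5, 0x60c6, 0x70e7,
--         0x8108, 0x9129, 0xa14a, 0xb16b, 0xc18c, 0xd1ad, 0xe1ce, 0xf1ef,
--         0x1231, 0x0210, 0x3273, 0x2252, 0x52b5, 0x4294, 0x72f7, 0x62d6,
--         0x9339, 0x8318, 0xb37b, 0xa35a, 0xd3bd, 0xc39c, 0xf3ff, 0xe3de,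
--         0x2462, 0x3443, 0x0420, 0x1401, 0x64e6, 0x74c7, 0x44a4, 0x5485,
--         0xa56a, 0xb54b, 0x8528, 0x9509, 0xe5ee, 0xf5cf, 0xc5ac, 0xd58d,
--         0x3653, 0x2672, 0x1611, 0x0630, 0x76d7, 0x66f6, 0x5695, 0x46b4,
--         0xb75b, 0xa77a, 0x9719, 0x8738, 0xf7df, 0xe7fe, 0xd79d, 0xc7bc,
--         0x48c4, 0x58e5, 0x6886, 0x78a7, 0x0840, 0x1861, 0x2802, 0x3823,
--         0xc9cc, 0xd9ed, 0xe98e, 0xf9af, 0x8948, 0x9969, 0xa90a, 0xb92b,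
--         0x5af5, 0x4ad4, 0x7ab7, 0x6a96, 0x1a71, 0x0a50, 0x3a33, 0x2a12,
--         0xdbfd, 0xcbdc, 0xfbbf, 0xeb9e, 0x9b79, 0x8b58, 0xbb3b, 0xab1a,
--         0x6ca6, 0x7c87, 0x4ce4, 0x5cc5, 0x2c22, 0x3c03, 0x0c60, 0x1c41,
--         0xedae, 0xfd8f, 0xcdec, 0xddcd, 0xad2a, 0xbd0b, 0x8d68, 0x9d49,
--         0x7e97, 0x6eb6, 0x5ed5, 0x4ef4, 0x3e13, 0x2e32, 0x1e51, 0x0e70,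
--         0xff9f, 0xefbe, 0xdfdd, 0xcffc, 0xbf1b, 0xaf3a, 0x9f59, 0x8f78,
--         0x9188, 0x81a9, 0xb1ca, 0xa1eb, 0xd10c, 0xc12d, 0xf14e, 0xe16f,
--         0x1080, 0x00a1, 0x30c2, 0x20e3, 0x5004, 0x4025, 0x7046, 0x6067,
--         0x83b9, 0x9398, 0xa3fb, 0xb3da, 0xc33d, 0xd31c, 0xe37f, 0xf35e,
--         0x02b1, 0x1290, 0x22f3, 0x32d2, 0x4235, 0x5214, 0x6277, 0x7256,
--         0xb5ea, 0xa5cb, 0x95a8, 0x8589, 0xf56e, 0xe54f, 0xd52c, 0xc50d,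
--         0x34e2, 0x24c3, 0x14a0, 0x0481, 0x7466, 0x6447, 0x5424, 0x4405,
--         0xa7db, 0xb7fa, 0x8799, 0x97b8, 0xe75f, 0xf77e, 0xc71d, 0xd73c,
--         0x26d3, 0x36f2, 0x0691, 0x16b0, 0x6657, 0x7676, 0x4615, 0x5634,
--         0xd94c, 0xc96d, 0xf90e, 0xe92f, 0x99c8, 0x89e9, 0xb98a, 0xa9ab,
--         0x5844, 0x4865, 0x7806, 0x6827, 0x18c0, 0x08e1, 0x3882, 0x28a3,
--         0xcb7d, 0xdb5c, 0xeb3f, 0xfb1e, 0x8bf9, 0x9bd8, 0xabbb, 0xbb9a,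
--         0x4a75, 0x5a54, 0x6a37, 0x7a16, 0x0af1, 0x1ad0, 0x2ab3, 0x3a92,
--         0xfd2e, 0xed0f, 0xdd6c, 0xcd4d, 0xbdaa, 0xad8b, 0x9de8, 0x8dc9,
--         0x7c26, 0x6c07, 0x5c64, 0x4c45, 0x3ca2, 0x2c83, 0x1ce0, 0x0cc1,
--         0xef1f, 0xff3e, 0xcf5d, 0xdf7c, 0xaf9b, 0xbfba, 0x8fd9, 0x9ff8,
--         0x6e17, 0x7e36, 0x4e55, 0x5e74, 0x2e93, 0x3eb2, 0x0ed1, 0x1ef0,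
--     ]
--
--     checksum = 0
--
--     for b in bytearray(data, "ascii"):
--         checksum = ((checksum << 8) & 0xff00 ^ crc16_ccitt_table[((checksum >> 8) & 0xff) ^ b]) & 0xffff
--
--     return checksum & 0xffff
-- ===== SOURCE B (Python) =====
-- def calculate_filename_hash_crc16_cs(data):
--     crc = 0
--     for b in bytearray(data, "ascii"):
--         crc ^= b << 8
--         for _ in range(8):
--             if crc & 0x8000:
--                 crc = ((crc << 1) ^ 0x1021) & 0xffff
--             else:
--                 crc = (crc << 1) & 0xffff
--     return crc & 0xffff
-- ===== Notes on version B (the rewrite author's own statement) =====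
-- stated objective: simpler
-- what changed: Replaced A's 256-entry CRC16-CCITT lookup table with the classic bitwise loop: per byte, XOR the byte into the high half of the crc and run 8 shift-left/XOR-0x1021 rounds masked to 16 bits.
import Mathlib
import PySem

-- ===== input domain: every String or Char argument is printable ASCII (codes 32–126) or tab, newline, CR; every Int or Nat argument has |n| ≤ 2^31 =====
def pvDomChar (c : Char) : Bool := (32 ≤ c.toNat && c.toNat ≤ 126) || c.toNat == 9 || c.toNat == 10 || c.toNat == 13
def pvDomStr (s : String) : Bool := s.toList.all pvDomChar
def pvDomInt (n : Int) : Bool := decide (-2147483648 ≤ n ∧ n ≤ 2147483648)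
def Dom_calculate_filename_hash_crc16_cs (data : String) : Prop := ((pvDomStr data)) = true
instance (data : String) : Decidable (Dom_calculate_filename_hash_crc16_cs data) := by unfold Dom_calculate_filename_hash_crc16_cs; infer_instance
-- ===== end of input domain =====

-- B replaces A's 256-entry CRC16-CCITT lookup table with the classic 8-step bitwise
-- shift/XOR loop per byte (objective: simpler — no table; same per-byte cost class).

-- ===== PORT A =====
-- A's local constant list crc16_ccitt_table (index is always < 256 on the admitted
-- inputs, so getD's default is never taken)
def pvCrcTable : List Nat := [0x0000, 0x1021, 0x2042, 0x3063, 0x4084, 0x50a5, 0x60c6, 0x70e7, 0x8108, 0x9129, 0xa14a, 0xb16b, 0xc18c, 0xd1ad, 0xe1ce, 0xf1ef, 0x1231, 0x0210, 0x3273, 0x2252, 0x52b5, 0x4294, 0x72f7, 0x62d6, 0x9339, 0x8318, 0xb37b, 0xa35a, 0xd3bd, 0xc39c, 0xf3ff, 0xe3de, 0x2462, 0x3443, 0x0420, 0x1401, 0x64e6, 0x74c7, 0x44a4, 0x5485, 0xa56a, 0xb54b, 0x8528, 0x9509, 0xe5ee, 0xf5cf, 0xc5ac, 0xd58d, 0x3653,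 0x2672, 0x1611, 0x0630, 0x76d7, 0x66f6, 0x5695, 0x46b4, 0xb75b, 0xa77a, 0x9719, 0x8738, 0xf7df, 0xe7fe, 0xd79d, 0xc7bc, 0x48c4, 0x58e5, 0x6886, 0x78a7, 0x0840, 0x1861, 0x2802, 0x3823, 0xc9cc, 0xd9ed, 0xe98e, 0xf9af, 0x8948, 0x9969, 0xa90a, 0xb92b, 0x5af5, 0x4ad4, 0x7ab7, 0x6a96, 0x1a71, 0x0a50, 0x3a33, 0x2a12, 0xdbfd, 0xcbdc, 0xfbbf, 0xeb9e, 0x9b79, 0x8b58, 0xbb3b, 0xab1a, 0x6ca6, 0x7c87, 0x4ce4, 0x5cc5, 0x2c22, 0x3c03, 0x0c60, 0x1c41, 0xedae, 0xfd8f, 0xcdec, 0xddcd, 0xad2a, 0xbd0b, 0x8d68, 0x9d49, 0x7e97, 0x6eb6, 0x5ed5, 0x4ef4, 0x3e13, 0x2e32, 0x1e51, 0x0e70, 0xff9f, 0xefbe, 0xdfdd, 0xcffc, 0xbf1b, 0xaf3a, 0x9f59, 0x8f78, 0x9188, 0x81a9, 0xb1ca, 0xa1eb, 0xd10c, 0xc12d,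 0xf14e, 0xe16f, 0x1080, 0x00a1, 0x30c2, 0x20e3, 0x5004, 0x4025, 0x7046, 0x6067, 0x83b9, 0x9398, 0xa3fb, 0xb3da, 0xc33d, 0xd31c, 0xe37f, 0xf35e, 0x02b1, 0x1290, 0x22f3, 0x32d2, 0x4235, 0x5214, 0x6277, 0x7256, 0xb5ea, 0xa5cb, 0x95a8, 0x8589, 0xf56e, 0xe54f, 0xd52c, 0xc50d, 0x34e2, 0x24c3, 0x14a0, 0x0481, 0x7466, 0x6447, 0x5424, 0x4405, 0xa7db, 0xb7fa, 0x8799, 0x97b8, 0xe75f, 0xf77e, 0xc71d, 0xd73c, 0x26d3, 0x36f2, 0x0691, 0x16b0, 0x6657, 0x7676, 0x4615, 0x5634, 0xd94c, 0xc96d, 0xf90e, 0xe92f, 0x99c8, 0x89e9, 0xb98a, 0xa9ab, 0x5844, 0x4865, 0x7806, 0x6827, 0x18c0, 0x08e1, 0x3882, 0x28a3, 0xcb7d, 0xdb5c, 0xeb3f, 0xfb1e, 0x8bf9, 0x9bd8, 0xabbb, 0xbb9a, 0x4a75, 0x5a54, 0x6a37, 0x7a16, 0x0af1, 0x1ad0,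 0x2ab3, 0x3a92, 0xfd2e, 0xed0f, 0xdd6c, 0xcd4d, 0xbdaa, 0xad8b, 0x9de8, 0x8dc9, 0x7c26, 0x6c07, 0x5c64, 0x4c45, 0x3ca2, 0x2c83, 0x1ce0, 0x0cc1, 0xef1f, 0xff3e, 0xcf5d, 0xdf7c, 0xaf9b, 0xbfba, 0x8fd9, 0x9ff8, 0x6e17, 0x7e36, 0x4e55, 0x5e74, 0x2e93, 0x3eb2, 0x0ed1, 0x1ef0]

def calculate_filename_hash_crc16_cs (data : String) : Int :=
  -- for b in bytearray(data, "ascii"): checksum = ((checksum << 8) & 0xff00 ^ table[((checksum >> 8) & 0xff) ^ b]) & 0xffff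
  let checksum : Nat := data.toList.foldl
    (fun checksum c =>
      (((checksum <<< 8) &&& 0xff00) ^^^ pvCrcTable.getD (((checksum >>> 8) &&& 0xff) ^^^ c.toNat) 0) &&& 0xffff)
    0
  ((checksum &&& 0xffff : Nat) : Int)

-- ===== PORT B =====
-- one round of Source B's inner 'for _ in range(8)' body
def pvCrcRound (crc : Nat) : Nat :=
  if crc &&& 0x8000 != 0 then ((crc <<< 1) ^^^ 0x1021) &&& 0xffff else (crc <<< 1) &&& 0xffff

def calculate_filename_hash_crc16_cs_alt (data : String) : Int :=
  -- for b in bytearray(data, "ascii"): crc ^= b << 8; then 8 shift/XOR rounds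
  let crc : Nat := data.toList.foldl
    (fun crc c => (List.range 8).foldl (fun crc _ => pvCrcRound crc) (crc ^^^ (c.toNat <<< 8)))
    0
  ((crc &&& 0xffff : Nat) : Int)

-- ===== PRECONDITION & SPEC =====
def Spec_calculate_filename_hash_crc16_cs (data : String) (out : Int) : Prop := out = calculate_filename_hash_crc16_cs_alt data
instance (data : String) (out : Int) : Decidable (Spec_calculate_filename_hash_crc16_cs data out) := by unfold Spec_calculate_filename_hash_crc16_cs; infer_instance

-- ===== CLAIM (what is proved, stated in full; the proofs are below) =====
def Claim_equal_calculate_filename_hash_crc16_cs : Prop := ∀ (data : String), Dom_calculate_filename_hash_crc16_cs data → Spec_calculate_filename_hash_crc16_cs data (calculate_filename_hash_crc16_cs data)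

-- ===== LEMMAS AND PROOFS =====

-- eight rounds, as B's inner foldl computes them
def pvF8 (crc : Nat) : Nat := (List.range 8).foldl (fun c _ => pvCrcRound c) crc

theorem pvF8_eq (x : Nat) : pvF8 x =
    pvCrcRound (pvCrcRound (pvCrcRound (pvCrcRound (pvCrcRound (pvCrcRound (pvCrcRound (pvCrcRound x))))))) := rfl

theorem round_lt (x : Nat) : pvCrcRound x < 65536 := by
  unfold pvCrcRound
  split <;> exact Nat.lt_of_le_of_lt Nat.and_le_right (by norm_num)

theorem round_linear (x y : Nat) : pvCrcRound (x ^^^ y) = pvCrcRound x ^^^ pvCrcRound y := by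
  unfold pvCrcRound
  have hx : (x ^^^ y) &&& 0x8000 = (x &&& 0x8000) ^^^ (y &&& 0x8000) :=
    Nat.and_xor_distrib_right
  have h15 : (0x8000 : Nat) = 2 ^ 15 := by decide
  have dx : x &&& 0x8000 = 0 ∨ x &&& 0x8000 = 0x8000 := by
    rw [h15, Nat.and_two_pow]; rcases x.testBit 15 <;> simp
  have dy : y &&& 0x8000 = 0 ∨ y &&& 0x8000 = 0x8000 := by
    rw [h15, Nat.and_two_pow]; rcases y.testBit 15 <;> simp
  rcases dx with dx | dx <;> rcases dy with dy | dy <;>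
    rw [hx, dx, dy] <;> norm_num <;>
    rw [← Nat.and_xor_distrib_right] <;> congr 1 <;>
    simp [Nat.shiftLeft_xor_distrib, Nat.xor_assoc, Nat.xor_comm, Nat.xor_left_comm]

theorem pvF8_linear (x y : Nat) : pvF8 (x ^^^ y) = pvF8 x ^^^ pvF8 y := by
  simp [pvF8_eq, round_linear]

theorem pvF8_lt (x : Nat) : pvF8 x < 65536 := by rw [pvF8_eq]; exact round_lt _

-- the 256 low-byte cases: eight rounds on a value < 256 just shift it up
set_option maxRecDepth 10000 in
theorem pvF8_low : ∀ l < 256, pvF8 l = l <<< 8 := by decide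

-- the 256 table entries are exactly eight rounds on the high byte
set_option maxRecDepth 10000 in
theorem pvTable_f8 : ∀ m < 256, pvCrcTable.getD m 0 = pvF8 (m <<< 8) := by decide

-- bit gymnastics
theorem L1 (x : Nat) : (x <<< 8) &&& 0xff00 = (x &&& 0xff) <<< 8 := by
  rw [show (0xff00 : Nat) = 255 <<< 8 by decide, ← Nat.shiftLeft_and_distrib]

theorem L2 (x : Nat) (h : x < 65536) : (x >>> 8) &&& 0xff = x >>> 8 := by
  have h2 : x >>> 8 < 256 := by rw [Nat.shiftRight_eq_div_pow]; omega
  exact Nat.and_two_pow_sub_one_of_lt_two_pow (n := 8) h2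

theorem L3 (x b : Nat) :
    x ^^^ (b <<< 8) = (((x >>> 8) ^^^ b) <<< 8) ^^^ (x &&& 0xff) := by
  apply Nat.eq_of_testBit_eq; intro i
  simp only [Nat.testBit_xor, Nat.testBit_shiftLeft, Nat.testBit_and,
    Nat.testBit_shiftRight, show (0xff : Nat) = 2^8 - 1 by decide, Nat.testBit_two_pow_sub_one]
  by_cases h8 : 8 ≤ i
  · simp [h8, Nat.add_sub_cancel' h8, show ¬ i < 8 by omega]
  · simp [h8, show i < 8 by omega]

theorem mask_id (x : Nat) (h : x < 65536) : x &&& 0xffff = x :=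
  Nat.and_two_pow_sub_one_of_lt_two_pow (n := 16) h

-- per-byte steps agree on 16-bit state and byte input
theorem step_eq (crc b : Nat) (hc : crc < 65536) (hb : b < 256) :
    (((crc <<< 8) &&& 0xff00) ^^^ pvCrcTable.getD (((crc >>> 8) &&& 0xff) ^^^ b) 0) &&& 0xffff
      = pvF8 (crc ^^^ (b <<< 8)) := by
  have hk : crc >>> 8 < 256 := by rw [Nat.shiftRight_eq_div_pow]; omega
  have hl : crc &&& 0xff < 256 := Nat.lt_of_le_of_lt Nat.and_le_right (by norm_num)
  have hm : (crc >>> 8) ^^^ b < 256 := Nat.xor_lt_two_pow (n := 8) hk hb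
  rw [L1, L2 crc hc, L3 crc b, pvF8_linear, pvF8_low _ hl, ← pvTable_f8 _ hm]
  have hsl : (crc &&& 0xff) <<< 8 < 65536 := by
    rw [Nat.shiftLeft_eq]; omega
  have ht : pvCrcTable.getD ((crc >>> 8) ^^^ b) 0 < 65536 := by
    rw [pvTable_f8 _ hm]; exact pvF8_lt _
  rw [mask_id _ (Nat.xor_lt_two_pow (n := 16) hsl ht), Nat.xor_comm]

theorem fold_eq (cs : List Char) (h : ∀ c ∈ cs, pvDomChar c = true) :
    ∀ crc : Nat, crc < 65536 →
      cs.foldl (fun checksum c =>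
          (((checksum <<< 8) &&& 0xff00) ^^^ pvCrcTable.getD (((checksum >>> 8) &&& 0xff) ^^^ c.toNat) 0) &&& 0xffff) crc
        = cs.foldl (fun crc c => (List.range 8).foldl (fun crc _ => pvCrcRound crc) (crc ^^^ (c.toNat <<< 8))) crc := by
  induction cs with
  | nil => intro crc _; rfl
  | cons c cs ih =>
    intro crc hc
    have hcdom : pvDomChar c = true := h c (List.mem_cons_self ..)
    have hb : c.toNat < 256 := by
      simp only [pvDomChar, Bool.or_eq_true, Bool.and_eq_true, decide_eq_true_eq,
        beq_iff_eq] at hcdom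
      omega
    have hstep := step_eq crc c.toNat hc hb
    simp only [List.foldl_cons]
    rw [hstep]
    have hlt : pvF8 (crc ^^^ (c.toNat <<< 8)) < 65536 := pvF8_lt _
    have : (List.range 8).foldl (fun crc _ => pvCrcRound crc) (crc ^^^ (c.toNat <<< 8))
        = pvF8 (crc ^^^ (c.toNat <<< 8)) := rfl
    rw [this]
    exact ih (fun c hcm => h c (List.mem_cons_of_mem _ hcm)) _ hlt

-- ===== VERDICT (by name: the statement is the Claim_ definition above) =====
theorem calculate_filename_hash_crc16_cs_spec : Claim_equal_calculate_filename_hash_crc16_cs := by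
  intro data hdom
  unfold Spec_calculate_filename_hash_crc16_cs
  unfold calculate_filename_hash_crc16_cs calculate_filename_hash_crc16_cs_alt
  have h : ∀ c ∈ data.toList, pvDomChar c = true := by
    have := hdom
    unfold Dom_calculate_filename_hash_crc16_cs pvDomStr at this
    exact List.all_eq_true.mp this
  rw [fold_eq data.toList h 0 (by norm_num)]
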